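-- pv_equiv track=rewrite | github.com/wakkawarpman-oss/hanna-v3-2-clean | src/adapters/reconng.py | _detect_seed
-- ===== SOURCE A (Python) =====
-- def _detect_seed(target_name: str, known_usernames: list[str]) -> tuple[str, str]:
--     for value in known_usernames:
--         value = value.strip()
--         if "@" in value:
--             return "email", value
--     for value in [target_name] + known_usernames:
--         value = value.strip()
--         if not value:
--             continue
--         if value.startswith(("http://", "https://")):
--             value = value.split("://", 1)[1].split("/", 1)[0]
--         if "." in value and " " not in value:
--             return "domain", value
--     for value in known_usernames:
--         if value.strip():
--             return "username", value.strip()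
--     return "", ""
-- ===== SOURCE B (Python) =====
-- def _detect_seed(target_name: str, known_usernames: list[str]) -> tuple[str, str]:
--     # One pass over [target] + usernames, recording the first candidate for each slot.
--     email = domain = username = None
--     for i, raw in enumerate([target_name] + known_usernames):
--         v = raw.strip()
--         if not v:
--             continue
--         if i > 0:
--             if email is None and "@" in v:
--                 email = v
--             if username is None:
--                 username = v
--         if domain is None:
--             d = v
--             if d.startswith("http://") or d.startswith("https://"):
--                 d = d.split("://", 1)[1].split("/", 1)[0]
--             if "." in d and " " not in d:
--                 domain = d
--     if email is not None:
--         return "email", email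
--     if domain is not None:
--         return "domain", domain
--     if username is not None:
--         return "username", username
--     return "", ""
-- ===== Notes on version B (the rewrite author's own statement) =====
-- stated objective: alternative
-- what changed: Replaced A's three prioritised passes (emails, then domains over target+usernames, then non-blank usernames) by a single pass that records the first candidate for each of the three slots and selects by priority afterwards.
import Mathlib
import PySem

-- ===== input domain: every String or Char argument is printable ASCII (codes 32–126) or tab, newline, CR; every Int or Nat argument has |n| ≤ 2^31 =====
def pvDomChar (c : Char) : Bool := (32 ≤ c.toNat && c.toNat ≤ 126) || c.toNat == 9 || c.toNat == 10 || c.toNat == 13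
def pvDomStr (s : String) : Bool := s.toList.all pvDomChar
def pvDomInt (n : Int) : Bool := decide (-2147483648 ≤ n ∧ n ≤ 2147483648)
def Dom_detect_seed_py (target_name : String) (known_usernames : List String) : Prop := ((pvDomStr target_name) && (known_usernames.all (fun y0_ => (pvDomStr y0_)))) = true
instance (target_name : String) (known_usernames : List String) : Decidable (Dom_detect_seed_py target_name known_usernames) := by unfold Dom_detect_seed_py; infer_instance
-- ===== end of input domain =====

-- B replaces A's three prioritised scans by ONE pass that records the first email/domain/username
-- candidate in separate slots and picks by priority afterwards (objective: alternative decomposition).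

-- ===== PORT A =====
-- A's in-loop URL-prefix stripping: value = value.split("://",1)[1].split("/",1)[0]
def pvAStripUrl (v : String) : String :=
  if PySem.Str.startswith v "http://" || PySem.Str.startswith v "https://" then
    let p1 := ((PySem.Str.splitMax? v "://" 1).getD []).getD 1 ""
    ((PySem.Str.splitMax? p1 "/" 1).getD []).getD 0 ""
  else v

-- first loop: first stripped username containing "@"
def pvALoop1 : List String → Option (String × String)
  | [] => none
  | v :: rest =>
    let v := PySem.Str.strip v
    if PySem.Str.isIn "@" v then some ("email", v) else pvALoop1 rest

-- second loop: first domain-looking value in [target_name] + known_usernames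
def pvALoop2 : List String → Option (String × String)
  | [] => none
  | v :: rest =>
    let v := PySem.Str.strip v
    if v = "" then pvALoop2 rest
    else
      let v := pvAStripUrl v
      if PySem.Str.isIn "." v && !PySem.Str.isIn " " v then some ("domain", v)
      else pvALoop2 rest

-- third loop: first non-blank username
def pvALoop3 : List String → Option (String × String)
  | [] => none
  | v :: rest =>
    if PySem.Str.strip v = "" then pvALoop3 rest
    else some ("username", PySem.Str.strip v)

def detect_seed_py (target_name : String) (known_usernames : List String) : String × String :=
  match pvALoop1 known_usernames with
  | some r => r
  | none =>
    match pvALoop2 (target_name :: known_usernames) with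
    | some r => r
    | none =>
      match pvALoop3 known_usernames with
      | some r => r
      | none => ("", "")

-- ===== PORT B =====
-- same URL-prefix stripping expression as Source B's domain branch
def pvBStripUrl (d : String) : String :=
  if PySem.Str.startswith d "http://" || PySem.Str.startswith d "https://" then
    let p1 := ((PySem.Str.splitMax? d "://" 1).getD []).getD 1 ""
    ((PySem.Str.splitMax? p1 "/" 1).getD []).getD 0 ""
  else d

-- loop body of Source B: state = (email, domain, username) slots
def pvBStep (st : Option String × Option String × Option String) (p : Int × String) :
    Option String × Option String × Option String :=
  let email := st.1
  let domain := st.2.1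
  let username := st.2.2
  let v := PySem.Str.strip p.2
  if v = "" then st
  else
    let email := if 0 < p.1 ∧ email = none ∧ PySem.Str.isIn "@" v then some v else email
    let username := if 0 < p.1 ∧ username = none then some v else username
    let domain :=
      if domain = none then
        let d := pvBStripUrl v
        if PySem.Str.isIn "." d && !PySem.Str.isIn " " d then some d else domain
      else domain
    (email, domain, username)

def detect_seed_py_alt (target_name : String) (known_usernames : List String) : String × String :=
  let st := (PySem.List.enumerate (target_name :: known_usernames) 0).foldl pvBStep (none, none, none)
  match st.1 with
  | some e => ("email", e)
  | none =>
    match st.2.1 with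
    | some d => ("domain", d)
    | none =>
      match st.2.2 with
      | some u => ("username", u)
      | none => ("", "")

-- ===== PRECONDITION & SPEC =====
def Spec_detect_seed_py (target_name : String) (known_usernames : List String) (out : String × String) : Prop := out = detect_seed_py_alt target_name known_usernames
instance (target_name : String) (known_usernames : List String) (out : String × String) : Decidable (Spec_detect_seed_py target_name known_usernames out) := by unfold Spec_detect_seed_py; infer_instance

-- ===== CLAIM (what is proved, stated in full; the proofs are below) =====
def Claim_equal_detect_seed_py : Prop := ∀ (target_name : String) (known_usernames : List String), Dom_detect_seed_py target_name known_usernames → Spec_detect_seed_py target_name known_usernames (detect_seed_py target_name known_usernames)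

-- ===== LEMMAS AND PROOFS =====

-- per-slot candidate extractors
def pvFE (v : String) : Option String :=
  let s := PySem.Str.strip v
  if PySem.Str.isIn "@" s then some s else none

def pvFD (v : String) : Option String :=
  let s := PySem.Str.strip v
  if s = "" then none
  else
    let d := pvAStripUrl s
    if PySem.Str.isIn "." d && !PySem.Str.isIn " " d then some d else none

def pvFU (v : String) : Option String :=
  let s := PySem.Str.strip v
  if s = "" then none else some s

def pvOr (a b : Option String) : Option String :=
  match a with
  | some x => some x
  | none => b

lemma pvALoop1_eq (l : List String) :
    pvALoop1 l = (l.findSome? pvFE).map (fun v => ("email", v)) := by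
  induction l with
  | nil => rfl
  | cons x rest ih =>
    simp only [pvALoop1, pvFE, List.findSome?]
    split_ifs <;> simp [ih]

lemma pvALoop2_eq (l : List String) :
    pvALoop2 l = (l.findSome? pvFD).map (fun v => ("domain", v)) := by
  induction l with
  | nil => rfl
  | cons x rest ih =>
    simp only [pvALoop2, pvFD, List.findSome?]
    split_ifs <;> simp [ih]

lemma pvALoop3_eq (l : List String) :
    pvALoop3 l = (l.findSome? pvFU).map (fun v => ("username", v)) := by
  induction l with
  | nil => rfl
  | cons x rest ih =>
    simp only [pvALoop3, pvFU, List.findSome?]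
    split_ifs <;> simp [ih]

lemma pvStripUrl_eq : pvBStripUrl = pvAStripUrl := rfl

-- the fold computes the three slots independently, each as a first-match search
lemma pvFold_eq (l : List (Int × String)) (hpos : ∀ p ∈ l, 0 < p.1)
    (e d u : Option String) :
    l.foldl pvBStep (e, d, u) =
      (pvOr e ((l.map Prod.snd).findSome? pvFE),
       pvOr d ((l.map Prod.snd).findSome? pvFD),
       pvOr u ((l.map Prod.snd).findSome? pvFU)) := by
  induction l generalizing e d u with
  | nil => cases e <;> cases d <;> cases u <;> rfl
  | cons p rest ih =>
    have hp : 0 < p.1 := hpos p (List.mem_cons_self ..)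
    have hrest : ∀ q ∈ rest, 0 < q.1 := fun q hq => hpos q (List.mem_cons_of_mem _ hq)
    simp only [List.foldl_cons, List.map_cons, List.findSome?]
    by_cases hv : PySem.Str.strip p.2 = ""
    · have h1 : pvFE p.2 = none := by
        simp only [pvFE, hv]
        decide
      have h2 : pvFD p.2 = none := by simp [pvFD, hv]
      have h3 : pvFU p.2 = none := by simp [pvFU, hv]
      rw [show pvBStep (e, d, u) p = (e, d, u) by simp [pvBStep, hv]]
      rw [ih hrest]
      simp [h1, h2, h3]
    · have hstep : pvBStep (e, d, u) p =
          (pvOr e (pvFE p.2), pvOr d (pvFD p.2), pvOr u (pvFU p.2)) := by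
        simp only [pvBStep, pvFE, pvFD, pvFU, pvStripUrl_eq, hv, hp, true_and]
        cases e <;> cases d <;> cases u <;> simp [pvOr]
      rw [hstep, ih hrest]
      cases e <;> cases d <;> cases u <;>
        cases pvFE p.2 <;> cases pvFD p.2 <;> cases pvFU p.2 <;> simp [pvOr]

lemma pvStep_zero (t : String) :
    pvBStep (none, none, none) ((0 : Int), t) = (none, pvFD t, none) := by
  simp only [pvBStep, pvFD, pvStripUrl_eq]
  split_ifs with h <;> simp_all

-- ===== VERDICT (by name: the statement is the Claim_ definition above) =====
theorem detect_seed_py_spec : Claim_equal_detect_seed_py := by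
  intro t us _
  unfold Spec_detect_seed_py detect_seed_py detect_seed_py_alt
  rw [PySem.List.enumerate_cons, List.foldl_cons, pvStep_zero,
      pvFold_eq _ (by
        intro p hp
        rcases (PySem.List.mem_enumerate_iff _ _ _).1 hp with ⟨k, hk, rfl⟩
        positivity),
      PySem.List.map_snd_enumerate]
  rw [pvALoop1_eq, pvALoop2_eq, pvALoop3_eq]
  simp only [List.findSome?]
  cases he : us.findSome? pvFE <;> cases hd : pvFD t <;>
    cases hd2 : us.findSome? pvFD <;> cases hu : us.findSome? pvFU <;>
      simp [pvOr]
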